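-- pv_equiv track=rewrite | github.com/MatthiasOtth/GTA3 | parameter_budget.py | cost_gta3
-- ===== SOURCE A (Python) =====
-- def cost_attn_layer(ind, outd):
--     QKV = ind * outd * 3
--     return QKV
--
-- def cost_gta3_layer(ind, outd):
--     QKV = cost_attn_layer(ind, outd)
--     ff  = 5 * outd**2
--     norm = 2* outd
--     return QKV + ff + norm
--
-- def cost_gta3(ind, hid, outd, layers):
--     embed = ind * hid
--     gta3 = 0
--     for i in range(layers-1):
--         gta3 += cost_gta3_layer(hid, hid)
--     gta3 += cost_gta3_layer(hid, outd)
--     out_ff = 2 * outd**2 + outd*2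
--     total = embed + gta3 + out_ff
--
--     return embed, gta3, out_ff, total
-- ===== SOURCE B (Python) =====
-- def cost_gta3(ind, hid, outd, layers):
--     # closed form: (layers-1) identical hidden layers + one output layer
--     embed = ind * hid
--     per_hidden = 8 * hid * hid + 2 * hid            # 3*hid*hid + 5*hid*hid + 2*hid
--     final = 3 * hid * outd + 5 * outd * outd + 2 * outd
--     gta3 = max(layers - 1, 0) * per_hidden + final
--     out_ff = 2 * outd * outd + 2 * outd
--     total = embed + gta3 + out_ff
--     return embed, gta3, out_ff, total
-- ===== Notes on version B (the rewrite author's own statement) =====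
-- stated objective: faster
-- what changed: Replaced the per-layer accumulation loop with a closed-form multiplication of the constant per-hidden-layer cost by max(layers-1,0).
import Mathlib
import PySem

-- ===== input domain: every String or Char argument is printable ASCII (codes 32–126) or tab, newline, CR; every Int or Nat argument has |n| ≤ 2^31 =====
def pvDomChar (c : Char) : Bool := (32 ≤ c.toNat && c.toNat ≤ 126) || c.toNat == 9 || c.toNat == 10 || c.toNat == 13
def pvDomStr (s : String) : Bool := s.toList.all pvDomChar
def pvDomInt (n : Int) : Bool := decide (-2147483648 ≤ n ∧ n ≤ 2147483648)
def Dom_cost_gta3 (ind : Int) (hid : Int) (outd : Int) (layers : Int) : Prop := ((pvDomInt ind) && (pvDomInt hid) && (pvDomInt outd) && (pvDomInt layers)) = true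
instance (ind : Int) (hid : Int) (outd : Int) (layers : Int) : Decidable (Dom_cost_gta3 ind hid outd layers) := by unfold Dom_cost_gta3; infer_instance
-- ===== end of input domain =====

-- B replaces A's per-layer accumulation loop by a closed form (fewer operations, O(1) vs O(layers)).

-- ===== PORT A =====
def cost_attn_layer (ind : Int) (outd : Int) : Int := ind * outd * 3

def cost_gta3_layer (ind : Int) (outd : Int) : Int :=
  let QKV := cost_attn_layer ind outd
  let ff := 5 * outd ^ 2
  let norm := 2 * outd
  QKV + ff + norm

def cost_gta3 (ind : Int) (hid : Int) (outd : Int) (layers : Int) : List Int :=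
  let embed := ind * hid
  let gta3 := (PySem.List.pyRange 0 (layers - 1) 1).foldl
    (fun acc _ => acc + cost_gta3_layer hid hid) 0
  let gta3 := gta3 + cost_gta3_layer hid outd
  let out_ff := 2 * outd ^ 2 + outd * 2
  let total := embed + gta3 + out_ff
  [embed, gta3, out_ff, total]

-- ===== PORT B =====
def cost_gta3_alt (ind : Int) (hid : Int) (outd : Int) (layers : Int) : List Int :=
  let embed := ind * hid
  let per_hidden := 8 * hid * hid + 2 * hid
  let final := 3 * hid * outd + 5 * outd * outd + 2 * outd
  let gta3 := max (layers - 1) 0 * per_hidden + final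
  let out_ff := 2 * outd * outd + 2 * outd
  let total := embed + gta3 + out_ff
  [embed, gta3, out_ff, total]

-- ===== PRECONDITION & SPEC =====
def Spec_cost_gta3 (ind : Int) (hid : Int) (outd : Int) (layers : Int) (out : List Int) : Prop := out = cost_gta3_alt ind hid outd layers
instance (ind : Int) (hid : Int) (outd : Int) (layers : Int) (out : List Int) : Decidable (Spec_cost_gta3 ind hid outd layers out) := by unfold Spec_cost_gta3; infer_instance

-- ===== CLAIM (what is proved, stated in full; the proofs are below) =====
def Claim_equal_cost_gta3 : Prop := ∀ (ind : Int) (hid : Int) (outd : Int) (layers : Int), Dom_cost_gta3 ind hid outd layers → Spec_cost_gta3 ind hid outd layers (cost_gta3 ind hid outd layers)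

-- ===== LEMMAS AND PROOFS =====

-- Folding a constant addition over a list adds the constant once per element.
theorem foldl_add_const (c : Int) (l : List Int) (s : Int) :
    l.foldl (fun acc _ => acc + c) s = s + (l.length : Int) * c := by
  induction l generalizing s with
  | nil => simp
  | cons x xs ih => simp [List.foldl, ih]; ring

theorem gta3_loop_eq (hid layers : Int) :
    (PySem.List.pyRange 0 (layers - 1) 1).foldl (fun acc _ => acc + cost_gta3_layer hid hid) 0
      = max (layers - 1) 0 * (8 * hid * hid + 2 * hid) := by
  rw [foldl_add_const, PySem.List.length_pyRange_one]
  have h : ((((layers - 1) - 0).toNat : Int)) = max (layers - 1) 0 := by omega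
  rw [h, cost_gta3_layer, cost_attn_layer]
  ring

-- ===== VERDICT (by name: the statement is the Claim_ definition above) =====
theorem cost_gta3_spec : Claim_equal_cost_gta3 := by
  intro ind hid outd layers _
  show _ = _
  simp only [cost_gta3, cost_gta3_alt, gta3_loop_eq]
  simp only [cost_gta3_layer, cost_attn_layer]
  simp only [List.cons.injEq, and_true]
  exact ⟨trivial, by ring, by ring, by ring⟩
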